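-- pv_equiv track=rewrite | github.com/gahjelle/advent_of_code | 2019/17_set_and_forget/aoc17.py | split_instructions
-- ===== SOURCE A (Python) =====
-- MOVEMENT_FUNCTIONS = "ABC"
--
-- def split_instructions(directions, functions):
--     """Depth first search for instruction splits"""
--     stack = [(",".join(directions), [])]
--     while stack:
--         instructions, fragments = stack.pop()
--         if not instructions:
--             return fragments
--
--         for function in functions:
--             if not instructions.startswith(function):
--                 continue
--             if len(set(fragments) | {function}) > len(MOVEMENT_FUNCTIONS):
--                 continue
--             stack.append((instructions[len(function) + 1 :], fragments + [function]))
-- ===== SOURCE B (Python) =====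
-- MOVEMENT_FUNCTIONS = "ABC"
--
-- def split_instructions(directions, functions):
--     """Recursive backtracking over reversed(functions) instead of an explicit stack"""
--
--     def try_candidates(candidates, instructions, fragments):
--         if not candidates:
--             return None
--         function = candidates[0]
--         if instructions.startswith(function) and len(
--             set(fragments) | {function}
--         ) <= len(MOVEMENT_FUNCTIONS):
--             remaining = instructions[len(function) + 1 :]
--             extended = fragments + [function]
--             result = (
--                 extended
--                 if not remaining
--                 else try_candidates(order, remaining, extended)
--             )
--             if result is not None:
--                 return result
--         return try_candidates(candidates[1:], instructions, fragments)
--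
--     order = list(reversed(functions))
--     instructions = ",".join(directions)
--     if not instructions:
--         return []
--     return try_candidates(order, instructions, [])
-- ===== Notes on version B (the rewrite author's own statement) =====
-- stated objective: alternative
-- what changed: A's explicit-stack DFS (pushing all guarded children of a node before the next pop) is replaced by a recursive backtracking search that tries candidates from reversed(functions) one at a time and returns the first successful branch, with the solved-state check inlined at child creation.
import Mathlib
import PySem

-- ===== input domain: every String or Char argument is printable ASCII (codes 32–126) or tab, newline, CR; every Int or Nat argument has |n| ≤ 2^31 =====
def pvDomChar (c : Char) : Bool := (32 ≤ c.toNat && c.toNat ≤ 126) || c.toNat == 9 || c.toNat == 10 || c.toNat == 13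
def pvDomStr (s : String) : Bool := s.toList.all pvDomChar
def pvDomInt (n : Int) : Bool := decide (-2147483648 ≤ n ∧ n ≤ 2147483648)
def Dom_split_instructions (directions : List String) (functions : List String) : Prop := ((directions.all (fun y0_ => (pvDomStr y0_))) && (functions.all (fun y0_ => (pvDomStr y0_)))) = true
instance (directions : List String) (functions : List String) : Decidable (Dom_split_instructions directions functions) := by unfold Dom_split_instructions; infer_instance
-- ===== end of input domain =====

-- B replaces A's explicit-stack DFS by recursive backtracking over reversed(functions): a different decomposition of the same search, not claimed faster.

-- ===== PORT A =====
def pvMOVEMENT_FUNCTIONS : String := "ABC"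

-- termination measure for A's while-loop: each pop of a nonempty instruction string
-- replaces one weight (F+1)^len by at most F entries of strictly smaller exponent
-- termination measure for A's while-loop: each pop of a nonempty instruction string is replaced
-- by at most functions.length entries of strictly smaller exponent
def pvMeasureA (F : Nat) (stack : List (List Char × List String)) : Nat :=
  (stack.map (fun e => (F + 1) ^ e.1.length)).sum

-- one step of A's inner `for function in functions` loop, pushing onto the stack (head = top of stack)
def pvStepA (instructions : List Char) (fragments : List String)
    (st : List (List Char × List String)) (function : String) : List (List Char × List String) :=
  if PySem.Chars.startswith instructions function.toList then
    if PySem.Set.len (PySem.Set.union (PySem.Set.ofList fragments) [function]) > (PySem.Str.len pvMOVEMENT_FUNCTIONS) then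
      st
    else
      (PySem.Chars.slice instructions (some ((PySem.Str.len function : Int) + 1)) none, fragments ++ [function]) :: st
  else st

theorem pvStepA_measure (F : Nat) (instructions : List Char) (fragments : List String)
    (st : List (List Char × List String)) (f : String) :
    pvMeasureA F (pvStepA instructions fragments st f) ≤
      pvMeasureA F st + (F + 1) ^ (instructions.length - 1) := by
  unfold pvStepA
  split
  · split
    · omega
    · simp only [pvMeasureA, List.map_cons, List.sum_cons]
      have h1 : (PySem.Chars.slice instructions (some ((PySem.Str.len f : Int) + 1)) none).length
          ≤ instructions.length - 1 := by
        have : ((PySem.Str.len f : Int) + 1) = (((f.toList.length + 1 : Nat) : Int)) := by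
          simp [PySem.Str.len]
        rw [PySem.Chars.slice_eq_listSlice, this, PySem.List.slice_from_natCast]
        simp [List.length_drop]
        omega
      have h2 : (F + 1) ^ (PySem.Chars.slice instructions (some ((PySem.Str.len f : Int) + 1)) none).length
          ≤ (F + 1) ^ (instructions.length - 1) :=
        Nat.pow_le_pow_right (by omega) h1
      omega
  · omega

theorem pvFoldl_measure (F : Nat) (instructions : List Char) (fragments : List String) :
    ∀ (fs : List String) (acc : List (List Char × List String)),
      pvMeasureA F (fs.foldl (pvStepA instructions fragments) acc) ≤
        pvMeasureA F acc + fs.length * (F + 1) ^ (instructions.length - 1) := by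
  intro fs
  induction fs with
  | nil => intro acc; simp
  | cons f rest ih =>
    intro acc
    simp only [List.foldl_cons, List.length_cons]
    have h1 := ih (pvStepA instructions fragments acc f)
    have h2 := pvStepA_measure F instructions fragments acc f
    have : (rest.length + 1) * (F + 1) ^ (instructions.length - 1)
        = rest.length * (F + 1) ^ (instructions.length - 1) + (F + 1) ^ (instructions.length - 1) := by ring
    omega

-- A's while-loop over the explicit stack (head of the list = top of the stack)
def splitA_loop (functions : List String) (stack : List (List Char × List String)) : Option (List String) :=
  match stack with
  | [] => none
  | (instructions, fragments) :: rest =>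
    if instructions = [] then some fragments
    else splitA_loop functions (functions.foldl (pvStepA instructions fragments) rest)
termination_by pvMeasureA functions.length stack
decreasing_by
  rename_i hne
  have h := pvFoldl_measure functions.length instructions fragments functions rest
  have hL : 1 ≤ instructions.length := by
    cases instructions with
    | nil => exact absurd rfl hne
    | cons a l => simp
  have hpow : (functions.length + 1) ^ instructions.length
      = (functions.length + 1) ^ (instructions.length - 1) * (functions.length + 1) := by
    rw [← pow_succ]
    congr 1
    omega
  have hx : 1 ≤ (functions.length + 1) ^ (instructions.length - 1) :=
    Nat.one_le_pow _ _ (by omega)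
  have hsplit : (functions.length + 1) ^ (instructions.length - 1) * (functions.length + 1)
      = functions.length * (functions.length + 1) ^ (instructions.length - 1)
        + (functions.length + 1) ^ (instructions.length - 1) := by ring
  simp only [List.foldl_attach] at *
  simp only [pvMeasureA, List.map_cons, List.sum_cons] at *
  omega

def split_instructions (directions : List String) (functions : List String) : Option (List String) :=
  splitA_loop functions [(PySem.Chars.join [','] (directions.map String.toList), [])]

-- ===== PORT B =====
-- B's try_candidates: first candidate whose guarded recursive search succeeds (B's `solve` inlined as the `remaining = []` test)
def splitB_try (functions : List String) (candidates : List String)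
    (instructions : List Char) (fragments : List String) : Option (List String) :=
  match candidates with
  | [] => none
  | function :: rest =>
    if PySem.Chars.startswith instructions function.toList
        && decide (PySem.Set.len (PySem.Set.union (PySem.Set.ofList fragments) [function]) ≤ (PySem.Str.len pvMOVEMENT_FUNCTIONS)) then
      let remaining := PySem.Chars.slice instructions (some ((PySem.Str.len function : Int) + 1)) none
      let extended := fragments ++ [function]
      let result : Option (List String) :=
        if _h : remaining = [] then some extended
        else splitB_try functions functions.reverse remaining extended
      match result with
      | some r => some r
      | none => splitB_try functions rest instructions fragments
    else splitB_try functions rest instructions fragments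
termination_by (instructions.length, candidates.length)
decreasing_by
  · have hs : PySem.Chars.slice instructions (some ((PySem.Str.len function) + 1)) none
        = instructions.drop (function.toList.length + 1) := by
      have hk : ((PySem.Str.len function) + 1) = (((function.toList.length + 1 : Nat) : Int)) := by
        simp [PySem.Str.len]
      rw [PySem.Chars.slice_eq_listSlice, hk, PySem.List.slice_from_natCast]
    have h' : ¬ instructions.drop (function.toList.length + 1) = [] := by
      simp only [remaining, hs] at _h
      exact _h
    apply Prod.Lex.left
    have hlt : function.toList.length + 1 < instructions.length := by
      by_contra hc
      exact h' (List.drop_eq_nil_of_le (by omega))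
    rw [hs]
    simp only [List.length_drop]
    omega
  · exact Prod.Lex.right _ (by simp)
  · exact Prod.Lex.right _ (by simp)

def split_instructions_alt (directions : List String) (functions : List String) : Option (List String) :=
  let order := functions.reverse
  let instructions := PySem.Chars.join [','] (directions.map String.toList)
  if instructions = [] then some []
  else splitB_try functions order instructions []

-- ===== PRECONDITION & SPEC =====
def Spec_split_instructions (directions : List String) (functions : List String) (out : Option (List String)) : Prop := out = split_instructions_alt directions functions
instance (directions : List String) (functions : List String) (out : Option (List String)) : Decidable (Spec_split_instructions directions functions out) := by unfold Spec_split_instructions; infer_instance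

-- ===== CLAIM (what is proved, stated in full; the proofs are below) =====
def Claim_equal_split_instructions : Prop := ∀ (directions : List String) (functions : List String), Dom_split_instructions directions functions → Spec_split_instructions directions functions (split_instructions directions functions)

-- ===== LEMMAS AND PROOFS =====

def pvSolveB (functions : List String) (instructions : List Char) (fragments : List String) : Option (List String) :=
  if instructions = [] then some fragments
  else splitB_try functions functions.reverse instructions fragments

def pvChildOpt (instructions : List Char) (fragments : List String) (function : String) :
    Option (List Char × List String) :=
  if PySem.Chars.startswith instructions function.toList
      && decide (PySem.Set.len (PySem.Set.union (PySem.Set.ofList fragments) [function]) ≤ (PySem.Str.len pvMOVEMENT_FUNCTIONS)) then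
    some (PySem.Chars.slice instructions (some ((PySem.Str.len function : Int) + 1)) none, fragments ++ [function])
  else none

def pvChildren (instructions : List Char) (fragments : List String) (fs : List String) :
    List (List Char × List String) :=
  fs.filterMap (pvChildOpt instructions fragments)

theorem pvStepA_eq (instructions : List Char) (fragments : List String)
    (st : List (List Char × List String)) (f : String) :
    pvStepA instructions fragments st f =
      match pvChildOpt instructions fragments f with
      | some c => c :: st
      | none => st := by
  unfold pvStepA pvChildOpt
  split_ifs <;> simp_all
  omega

theorem pvFoldl_children (instructions : List Char) (fragments : List String) :
    ∀ (fs : List String) (acc : List (List Char × List String)),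
      fs.foldl (pvStepA instructions fragments) acc =
        (pvChildren instructions fragments fs).reverse ++ acc := by
  intro fs
  induction fs with
  | nil => intro acc; simp [pvChildren]
  | cons f rest ih =>
    intro acc
    simp only [List.foldl_cons]
    rw [pvStepA_eq]
    cases hc : pvChildOpt instructions fragments f with
    | some c => simp [ih, pvChildren, hc]
    | none => simp [ih, pvChildren, hc]

theorem pvSplitB_try_eq_findSome (functions : List String)
    (instructions : List Char) (fragments : List String) :
    ∀ (cands : List String),
      splitB_try functions cands instructions fragments =
        (pvChildren instructions fragments cands).findSome? (fun e => pvSolveB functions e.1 e.2) := by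
  intro cands
  induction cands with
  | nil => simp [splitB_try, pvChildren]
  | cons f rest ih =>
    rw [splitB_try]
    by_cases hg : (PySem.Chars.startswith instructions f.toList
        && decide (PySem.Set.len (PySem.Set.union (PySem.Set.ofList fragments) [f]) ≤ (PySem.Str.len pvMOVEMENT_FUNCTIONS))) = true
    · simp only [hg, if_true]
      have hco : pvChildOpt instructions fragments f
          = some (PySem.Chars.slice instructions (some ((PySem.Str.len f : Int) + 1)) none, fragments ++ [f]) := by
        unfold pvChildOpt
        rw [if_pos hg]
      have hchild : pvChildren instructions fragments (f :: rest)
          = (PySem.Chars.slice instructions (some ((PySem.Str.len f : Int) + 1)) none, fragments ++ [f])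
            :: pvChildren instructions fragments rest := by
        simp only [pvChildren, List.filterMap_cons, hco]
      rw [hchild, List.findSome?_cons]
      have hsolve : (if _ : PySem.Chars.slice instructions (some ((PySem.Str.len f : Int) + 1)) none = [] then some (fragments ++ [f])
          else splitB_try functions functions.reverse (PySem.Chars.slice instructions (some ((PySem.Str.len f : Int) + 1)) none) (fragments ++ [f]))
          = pvSolveB functions (PySem.Chars.slice instructions (some ((PySem.Str.len f : Int) + 1)) none) (fragments ++ [f]) := by
        unfold pvSolveB
        split <;> simp_all
      simp only [hsolve]
      cases pvSolveB functions (PySem.Chars.slice instructions (some ((PySem.Str.len f : Int) + 1)) none) (fragments ++ [f]) with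
      | some r => simp
      | none => simpa using ih
    · simp only [hg, Bool.false_eq_true, if_false]
      have hco : pvChildOpt instructions fragments f = none := by
        unfold pvChildOpt
        rw [if_neg hg]
      have hchild : pvChildren instructions fragments (f :: rest)
          = pvChildren instructions fragments rest := by
        simp only [pvChildren, List.filterMap_cons, hco]
      rw [hchild]
      exact ih

theorem pvChildren_reverse (instructions : List Char) (fragments : List String) (fs : List String) :
    pvChildren instructions fragments fs.reverse = (pvChildren instructions fragments fs).reverse := by
  simp [pvChildren, List.filterMap_reverse]

theorem pvFindSome_append {α β : Type} (f : α → Option β) (l₁ l₂ : List α) :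
    (l₁ ++ l₂).findSome? f = ((l₁.findSome? f).orElse (fun _ => l₂.findSome? f)) := by
  induction l₁ with
  | nil => simp
  | cons a l ih =>
    simp only [List.cons_append, List.findSome?_cons]
    cases f a <;> simp [ih]

theorem pvLoopA_eq (functions : List String) :
    ∀ (stack : List (List Char × List String)),
      splitA_loop functions stack = stack.findSome? (fun e => pvSolveB functions e.1 e.2) := by
  intro stack
  induction stack using splitA_loop.induct functions with
  | case1 => simp [splitA_loop]
  | case2 fragments rest =>
    rw [splitA_loop]
    simp [pvSolveB]
  | case3 instructions fragments rest hnil ih =>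
    simp only [List.foldl_attach] at ih
    rw [pvFoldl_children] at ih
    rw [splitA_loop]
    simp only [if_neg hnil]
    rw [pvFoldl_children, ih, pvFindSome_append, ← pvChildren_reverse,
      ← pvSplitB_try_eq_findSome, List.findSome?_cons]
    have hsb : pvSolveB functions instructions fragments
        = splitB_try functions functions.reverse instructions fragments := by
      unfold pvSolveB
      rw [if_neg hnil]
    rw [hsb]
    cases splitB_try functions functions.reverse instructions fragments <;> simp

-- ===== VERDICT (by name: the statement is the Claim_ definition above) =====
theorem split_instructions_spec : Claim_equal_split_instructions := by
  intro directions functions _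
  unfold Spec_split_instructions split_instructions split_instructions_alt
  rw [pvLoopA_eq]
  simp only [List.findSome?_cons, List.findSome?_nil]
  unfold pvSolveB
  by_cases h : PySem.Chars.join [','] (directions.map String.toList) = []
  · simp [h]
  · simp only [h, if_false]
    cases splitB_try functions functions.reverse (PySem.Chars.join [','] (directions.map String.toList)) [] <;> simp
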